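-- pv_equiv track=rewrite | github.com/AbhilashaTandon/Phonology-Generator | generate.py | get_inverse_percentile
-- ===== SOURCE A (Python) =====
-- def get_inverse_percentile(data, value):
--     # assumes data is sorted
--     first_idx = -1
--     last_idx = -1
--     for idx, x in enumerate(data):
--         if x == value and first_idx < 0:
--             first_idx = idx
--         if x == value:
--             last_idx = idx
--
--     if first_idx < 0:
--         return None
--
--     return data[len(data) - 1 - ((first_idx + last_idx) // 2)]
-- ===== SOURCE B (Python) =====
-- def get_inverse_percentile(data, value):
--     # divide and conquer: the (first, last) occurrence pair of a range is the
--     # merge of the pairs of its two halves.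
--     def rec(lo, hi):
--         if hi - lo == 0:
--             return None
--         if hi - lo == 1:
--             return (lo, lo) if data[lo] == value else None
--         mid = (lo + hi) // 2
--         l = rec(lo, mid)
--         r = rec(mid, hi)
--         if l is None:
--             return r
--         if r is None:
--             return l
--         return (l[0], r[1])
--
--     fl = rec(0, len(data))
--     if fl is None:
--         return None
--     return data[len(data) - 1 - (fl[0] + fl[1]) // 2]
-- ===== Notes on version B (the rewrite author's own statement) =====
-- stated objective: alternative
-- what changed: replaces A's single left-to-right fold carrying two sentinel accumulators by a divide-and-conquer recursion that computes the (first,last) occurrence pair of each half-range and merges them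
import Mathlib
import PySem

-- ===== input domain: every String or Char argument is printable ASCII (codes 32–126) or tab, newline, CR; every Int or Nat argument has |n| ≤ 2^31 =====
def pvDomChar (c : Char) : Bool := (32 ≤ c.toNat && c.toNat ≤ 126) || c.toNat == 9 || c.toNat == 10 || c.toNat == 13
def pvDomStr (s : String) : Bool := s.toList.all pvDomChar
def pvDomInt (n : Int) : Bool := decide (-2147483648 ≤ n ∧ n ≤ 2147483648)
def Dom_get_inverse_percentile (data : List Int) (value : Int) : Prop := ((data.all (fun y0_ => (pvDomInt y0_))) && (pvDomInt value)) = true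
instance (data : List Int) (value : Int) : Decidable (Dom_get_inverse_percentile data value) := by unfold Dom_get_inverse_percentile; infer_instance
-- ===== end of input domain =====

-- B replaces A's single linear fold with two sentinel accumulators by a divide-and-conquer
-- recursion merging (first,last)-occurrence pairs of half-ranges; same O(n) cost, values proved equal.


-- ===== PORT A =====
-- the for-loop over enumerate(data) maintaining (first_idx, last_idx), both initialised to -1
def get_inverse_percentile (data : List Int) (value : Int) : Option Int :=
  let st : Int × Int :=
    (PySem.List.enumerate data 0).foldl
      (fun (p : Int × Int) ix =>
        (if ix.2 = value ∧ p.1 < 0 then ix.1 else p.1,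
         if ix.2 = value then ix.1 else p.2))
      (-1, -1)
  if st.1 < 0 then none
  else PySem.List.pyGet? data ((data.length : Int) - 1 - PySem.Int.floordiv (st.1 + st.2) 2)

-- ===== PORT B =====
-- Source B's inner rec(lo, hi): (first, last) occurrence pair of data[lo:hi], merged from halves.
-- rec only reads data[lo] with lo < hi ≤ len, always in range, so getD lo 0 is exact.
def pvRec (data : List Int) (value : Int) (lo hi : Nat) : Option (Nat × Nat) :=
  if hi - lo = 0 then none
  else if hi - lo = 1 then (if data.getD lo 0 = value then some (lo, lo) else none)
  else
    let mid := (lo + hi) / 2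
    match pvRec data value lo mid, pvRec data value mid hi with
    | none, r => r
    | some l, none => some l
    | some l, some r => some (l.1, r.2)
termination_by hi - lo
decreasing_by all_goals omega

def get_inverse_percentile_alt (data : List Int) (value : Int) : Option Int :=
  match pvRec data value 0 data.length with
  | none => none
  | some fl =>
      PySem.List.pyGet? data
        ((data.length : Int) - 1 - PySem.Int.floordiv ((fl.1 : Int) + (fl.2 : Int)) 2)

-- ===== PRECONDITION & SPEC =====
def Spec_get_inverse_percentile (data : List Int) (value : Int) (out : Option Int) : Prop := out = get_inverse_percentile_alt data value
instance (data : List Int) (value : Int) (out : Option Int) : Decidable (Spec_get_inverse_percentile data value out) := by unfold Spec_get_inverse_percentile; infer_instance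

-- ===== CLAIM (what is proved, stated in full; the proofs are below) =====
def Claim_equal_get_inverse_percentile : Prop := ∀ (data : List Int) (value : Int), Dom_get_inverse_percentile data value → Spec_get_inverse_percentile data value (get_inverse_percentile data value)

-- ===== LEMMAS AND PROOFS =====

-- closed forms for the two accumulators of A's loop
def pvFst (data : List Int) (value : Int) : Int :=
  match List.idxOf? value data with
  | some n => n
  | none => -1

def pvLst (data : List Int) (value : Int) : Int :=
  match List.idxOf? value data.reverse with
  | some r => (data.length : Int) - 1 - r
  | none => -1

theorem pvIdx_append_of_mem (l t : List Int) (v : Int) (h : v ∈ l) :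
    List.idxOf? v (l ++ t) = List.idxOf? v l := by
  induction l with
  | nil => simp at h
  | cons a l ih =>
    rw [List.cons_append, List.idxOf?_cons, List.idxOf?_cons]
    by_cases hav : a = v
    · simp [hav]
    · rcases List.mem_cons.mp h with h' | h'
      · exact absurd h'.symm hav
      · simp [hav, ih h']

theorem pvIdx_append_singleton_self (l : List Int) (v : Int) (h : v ∉ l) :
    List.idxOf? v (l ++ [v]) = some l.length := by
  induction l with
  | nil => simp [List.idxOf?_cons]
  | cons a l ih =>
    have hav : ¬ a = v := fun he => h (he ▸ List.mem_cons_self)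
    rw [List.cons_append, List.idxOf?_cons]
    simp [hav, ih (fun hm => h (List.mem_cons_of_mem a hm))]

theorem pvLoop_eq (value : Int) (data : List Int) :
    (PySem.List.enumerate data 0).foldl
      (fun (p : Int × Int) ix =>
        (if ix.2 = value ∧ p.1 < 0 then ix.1 else p.1,
         if ix.2 = value then ix.1 else p.2))
      (-1, -1) = (pvFst data value, pvLst data value) := by
  induction data using List.reverseRecOn with
  | nil => simp [pvFst, pvLst, PySem.List.enumerate]
  | append_singleton l x ih =>
    rw [PySem.List.enumerate_append, List.foldl_append, ih]
    simp only [PySem.List.enumerate_cons, PySem.List.enumerate_nil, List.foldl_cons,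
      List.foldl_nil]
    by_cases hx : x = value
    · subst hx
      by_cases hm : x ∈ l
      · obtain ⟨k, hk⟩ := Option.isSome_iff_exists.mp (List.isSome_idxOf?.2 hm)
        have h1 : List.idxOf? x (l ++ [x]) = some k := by
          rw [pvIdx_append_of_mem l [x] x hm, hk]
        have h2 : List.idxOf? x (l ++ [x]).reverse = some 0 := by
          rw [List.reverse_append]
          simp [List.idxOf?_cons]
        simp only [pvFst, pvLst, hk, h1, h2]
        refine Prod.ext ?_ ?_
        · have : ¬ ((k : Int) < 0) := by omega
          simp [this]
        · simp
      · have h0 : List.idxOf? x l = none := List.idxOf?_eq_none_iff.2 hm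
        have h1 : List.idxOf? x (l ++ [x]) = some l.length :=
          pvIdx_append_singleton_self l x hm
        have h2 : List.idxOf? x (l ++ [x]).reverse = some 0 := by
          rw [List.reverse_append]
          simp [List.idxOf?_cons]
        simp only [pvFst, pvLst, h0, h1, h2]
        refine Prod.ext ?_ ?_
        · norm_num
        · simp
    · have h1 : List.idxOf? value (l ++ [x]) = List.idxOf? value l := by
        by_cases hm : value ∈ l
        · exact pvIdx_append_of_mem l [x] value hm
        · have : value ∉ l ++ [x] := by
            simp [hm]; intro he; exact hx he.symm
          rw [List.idxOf?_eq_none_iff.2 this, List.idxOf?_eq_none_iff.2 hm]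
      have h2 : List.idxOf? value (l ++ [x]).reverse
          = (List.idxOf? value l.reverse).map (· + 1) := by
        rw [List.reverse_append]
        simp [List.idxOf?_cons, hx]
      simp only [pvFst, pvLst, h1, h2]
      cases hr : List.idxOf? value l.reverse with
      | none => simp [hx]
      | some r =>
        simp [hx]
        ring

-- first-occurrence characterisation of idxOf?
theorem pvIdxOf_eq_some (data : List Int) (v : Int) (L : Nat) (hL : L < data.length)
    (hv : data[L] = v) (hne : ∀ i, (h : i < data.length) → i < L → data[i] ≠ v) :
    List.idxOf? v data = some L := by
  induction data generalizing L with
  | nil => simp at hL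
  | cons a t ih =>
    rw [List.idxOf?_cons]
    cases L with
    | zero =>
      simp at hv
      simp [hv]
    | succ L' =>
      have ha : ¬ a = v := by
        have := hne 0 (by simp) (by omega)
        simpa using this
      have hL' : L' < t.length := by simpa using hL
      have hv' : t[L'] = v := by simpa using hv
      have hne' : ∀ i, (h : i < t.length) → i < L' → t[i] ≠ v := by
        intro i hi' hlt
        have := hne (i + 1) (by simpa using Nat.succ_lt_succ hi') (by omega)
        simpa using this
      simp [ha, ih L' hL' hv' hne']

-- invariant of Source B's divide-and-conquer recursion: pvRec lo hi is none iff the range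
-- holds no occurrence, and otherwise the (first, last) occurrence pair of the range
theorem pvRec_inv (data : List Int) (value : Int) :
    ∀ (k lo hi : Nat), hi - lo = k → hi ≤ data.length →
    (pvRec data value lo hi = none ∧
      ∀ i, (h : i < data.length) → lo ≤ i → i < hi → data[i] ≠ value) ∨
    (∃ f l, pvRec data value lo hi = some (f, l) ∧ lo ≤ f ∧ f ≤ l ∧ l < hi ∧
      (∃ hf : f < data.length, data[f] = value) ∧
      (∃ hl : l < data.length, data[l] = value) ∧
      (∀ i, (h : i < data.length) → lo ≤ i → i < f → data[i] ≠ value) ∧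
      (∀ i, (h : i < data.length) → l < i → i < hi → data[i] ≠ value)) := by
  intro k
  induction k using Nat.strong_induction_on with
  | _ k ih =>
    intro lo hi hk hhi
    by_cases h0 : hi - lo = 0
    · rw [pvRec, if_pos h0]
      exact Or.inl ⟨rfl, fun i h hge hlt => by omega⟩
    · by_cases h1 : hi - lo = 1
      · have hlo : lo < data.length := by omega
        have hgd : data.getD lo 0 = data[lo] := List.getD_eq_getElem data 0 hlo
        by_cases hv : data.getD lo 0 = value
        · rw [pvRec, if_neg h0, if_pos h1, if_pos hv]
          exact Or.inr ⟨lo, lo, rfl, le_refl _, le_refl _, by omega,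
            ⟨hlo, by rw [← hgd]; exact hv⟩, ⟨hlo, by rw [← hgd]; exact hv⟩,
            fun i h hge hlt => by omega, fun i h hgt hlt => by omega⟩
        · rw [pvRec, if_neg h0, if_pos h1, if_neg hv]
          refine Or.inl ⟨rfl, fun i h hge hlt => ?_⟩
          have : i = lo := by omega
          subst this
          rw [← hgd]; exact hv
      · have hlh : lo < hi := by omega
        rw [pvRec, if_neg h0, if_neg h1]
        simp only []
        have hmid1 : lo < (lo + hi) / 2 := by omega
        have hmid2 : (lo + hi) / 2 < hi := by omega
        have ihL := ih ((lo + hi) / 2 - lo) (by omega) lo ((lo + hi) / 2) rfl (by omega)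
        have ihR := ih (hi - (lo + hi) / 2) (by omega) ((lo + hi) / 2) hi rfl hhi
        rcases ihL with ⟨e1, n1⟩ | ⟨f1, l1, e1, a1, b1, c1, v1, w1, p1, q1⟩ <;>
          rcases ihR with ⟨e2, n2⟩ | ⟨f2, l2, e2, a2, b2, c2, v2, w2, p2, q2⟩
        · rw [e1, e2]
          exact Or.inl ⟨rfl, fun i h hge hlt => by
            rcases Nat.lt_or_ge i ((lo + hi) / 2) with hl | hg
            · exact n1 i h hge hl
            · exact n2 i h hg hlt⟩
        · rw [e1, e2]
          exact Or.inr ⟨f2, l2, rfl, by omega, b2, c2, v2, w2,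
            fun i h hge hlt => by
              rcases Nat.lt_or_ge i ((lo + hi) / 2) with hl | hg
              · exact n1 i h hge hl
              · exact p2 i h hg hlt,
            q2⟩
        · rw [e1, e2]
          exact Or.inr ⟨f1, l1, rfl, a1, b1, by omega, v1, w1, p1,
            fun i h hgt hlt => by
              rcases Nat.lt_or_ge i ((lo + hi) / 2) with hl | hg
              · exact q1 i h hgt hl
              · exact n2 i h hg hlt⟩
        · rw [e1, e2]
          exact Or.inr ⟨f1, l2, rfl, a1, by omega, c2, v1, w2, p1, q2⟩

theorem get_inverse_percentile_eq (data : List Int) (value : Int) :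
    get_inverse_percentile data value = get_inverse_percentile_alt data value := by
  unfold get_inverse_percentile get_inverse_percentile_alt
  rw [pvLoop_eq]
  rcases pvRec_inv data value (data.length - 0) 0 data.length rfl (le_refl _) with
    ⟨e, hnone⟩ | ⟨f, l, e, _, hfl, hlh, ⟨hf, hfv⟩, ⟨hl, hlv⟩, hbefore, hafter⟩
  · have hnm : value ∉ data := by
      intro hm
      obtain ⟨k, hk, hkv⟩ := List.mem_iff_getElem.mp hm
      exact hnone k hk (by omega) hk hkv
    have h0 : List.idxOf? value data = none := List.idxOf?_eq_none_iff.2 hnm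
    have hfst : pvFst data value = -1 := by simp [pvFst, h0]
    simp only [hfst, e]
    norm_num
  · have hfsome : List.idxOf? value data = some f :=
      pvIdxOf_eq_some data value f hf hfv (fun i h hlt => hbefore i h (by omega) hlt)
    have hLrev : data.length - 1 - l < data.reverse.length := by
      rw [List.length_reverse]; omega
    have hvrev : data.reverse[data.length - 1 - l]'hLrev = value := by
      rw [List.getElem_reverse]
      have e2 : data.length - 1 - (data.length - 1 - l) = l := by omega
      simp only [e2]
      exact hlv
    have hnerev : ∀ i, (h : i < data.reverse.length) → i < data.length - 1 - l →
        data.reverse[i] ≠ value := by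
      intro i h hlt
      rw [List.getElem_reverse]
      have h' : i < data.length := by rw [List.length_reverse] at h; exact h
      exact hafter _ (by omega) (by omega) (by omega)
    have hrev : List.idxOf? value data.reverse = some (data.length - 1 - l) :=
      pvIdxOf_eq_some data.reverse value (data.length - 1 - l) hLrev hvrev hnerev
    have hfst : pvFst data value = (f : Int) := by simp [pvFst, hfsome]
    have hlst : pvLst data value = (l : Int) := by
      simp only [pvLst, hrev]
      have : ((data.length - 1 - l : Nat) : Int) = (data.length : Int) - 1 - (l : Int) := by
        omega
      rw [this]; ring
    have hnotneg : ¬ pvFst data value < 0 := by rw [hfst]; omega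
    rw [if_neg hnotneg, e, hfst, hlst]

-- ===== VERDICT (by name: the statement is the Claim_ definition above) =====
theorem get_inverse_percentile_spec : Claim_equal_get_inverse_percentile := by
  intro data value _
  exact get_inverse_percentile_eq data value
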